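-- pv_equiv track=rewrite | github.com/siahuat0727/tirf | src/play.py | process
-- ===== SOURCE A (Python) =====
-- x1 = 50
--
-- y1 = 50
--
-- def process(cons):
--     total_point = sum(len(con) for _, con in cons)
--     middle_frame = sum(frame * len(con) for frame, con in cons) // total_point
--     xs, ys = zip(*[
--         (x, y)
--         for _, con in cons
--         for x, y in con
--     ])
--     info = {
--         'frame_start': cons[0][0],
--         'frame_end': cons[-1][0],
--         'frame': middle_frame,
--         'x_min': min(xs),
--         'x_max': max(xs),
--         'x': sum(xs) // total_point,
--         'y_min': min(ys),
--         'y_max': max(ys),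
--         'y': sum(ys) // total_point,
--     }
--     for k in info.keys():
--         if k.startswith('x'):
--             info[k] += x1
--         if k.startswith('y'):
--             info[k] += y1
--     return info
-- ===== SOURCE B (Python) =====
-- x1 = 50
--
-- y1 = 50
--
-- def process(cons):
--     total_point = 0
--     frame_weighted = 0
--     x_min = x_max = y_min = y_max = None
--     x_sum = y_sum = 0
--     for frame, con in cons:
--         total_point += len(con)
--         frame_weighted += frame * len(con)
--         for x, y in con:
--             if x_min is None or x < x_min:
--                 x_min = x
--             if x_max is None or x > x_max:
--                 x_max = x
--             if y_min is None or y < y_min: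
--                 y_min = y
--             if y_max is None or y > y_max:
--                 y_max = y
--             x_sum += x
--             y_sum += y
--     return {
--         'frame_start': cons[0][0],
--         'frame_end': cons[-1][0],
--         'frame': frame_weighted // total_point,
--         'x_min': x_min + x1,
--         'x_max': x_max + x1,
--         'x': x_sum // total_point + x1,
--         'y_min': y_min + y1,
--         'y_max': y_max + y1,
--         'y': y_sum // total_point + y1,
--     }
-- ===== Notes on version B (the rewrite author's own statement) =====
-- stated objective: alternative
-- what changed: A makes four separate aggregate passes (two generator sums over cons, a zip-flatten, then min/max/sum over xs and ys) and patches the dict afterwards with a startswith key loop; B makes one pass over cons with running total/weighted-frame/min/max/sum accumulators and builds the dict directly with the +x1/+y1 offsets applied.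
import Mathlib
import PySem

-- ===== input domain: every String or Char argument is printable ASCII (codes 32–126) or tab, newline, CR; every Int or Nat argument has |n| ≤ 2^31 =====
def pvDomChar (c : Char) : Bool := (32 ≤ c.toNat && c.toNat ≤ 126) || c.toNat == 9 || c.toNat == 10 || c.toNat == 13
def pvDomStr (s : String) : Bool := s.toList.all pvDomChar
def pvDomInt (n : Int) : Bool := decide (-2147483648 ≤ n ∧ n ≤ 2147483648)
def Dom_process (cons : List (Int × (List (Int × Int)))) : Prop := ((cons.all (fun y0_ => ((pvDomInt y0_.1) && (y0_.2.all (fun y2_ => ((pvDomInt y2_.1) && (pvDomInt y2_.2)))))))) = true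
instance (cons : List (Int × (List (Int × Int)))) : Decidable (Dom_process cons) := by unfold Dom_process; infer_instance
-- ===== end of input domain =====

-- B replaces A's four separate aggregate passes (two sums over cons, zip-flatten, min/max/sum over xs and ys)
-- by a single fold over cons with an accumulator record; return-value equivalence only (objective: alternative).

-- ===== PORT A =====
def process (cons : List (Int × (List (Int × Int)))) : List (String × Int) :=
  let total_point : Int := (cons.map (fun p => ((p.2.length : Int)))).sum
  let middle_frame : Int :=
    PySem.Int.floordiv ((cons.map (fun p => p.1 * (p.2.length : Int))).sum) total_point
  let pts : List (Int × Int) := cons.flatMap (fun p => p.2)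
  let xs : List Int := pts.map Prod.fst
  let ys : List Int := pts.map Prod.snd
  let info : PySem.Dict String Int := PySem.Dict.ofList [
    ("frame_start", ((PySem.List.pyGet? cons 0).getD (0, [])).1),
    ("frame_end",   ((PySem.List.pyGet? cons (-1)).getD (0, [])).1),
    ("frame", middle_frame),
    ("x_min", (PySem.List.min? xs (fun v => v)).getD 0),
    ("x_max", (PySem.List.max? xs (fun v => v)).getD 0),
    ("x", PySem.Int.floordiv xs.sum total_point),
    ("y_min", (PySem.List.min? ys (fun v => v)).getD 0),
    ("y_max", (PySem.List.max? ys (fun v => v)).getD 0),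
    ("y", PySem.Int.floordiv ys.sum total_point)]
  let info := info.keys.foldl (fun d k =>
    let d := if PySem.Str.startswith k "x" then d.modify k 0 (· + 50) else d
    if PySem.Str.startswith k "y" then d.modify k 0 (· + 50) else d) info
  info.items

-- ===== PORT B =====
structure PvSt where
  total : Int
  fw : Int
  xmin : Option Int
  xmax : Option Int
  ymin : Option Int
  ymax : Option Int
  xsum : Int
  ysum : Int
deriving Repr, DecidableEq

def pvOptMin (o : Option Int) (x : Int) : Option Int :=
  match o with | none => some x | some m => if x < m then some x else some m

def pvOptMax (o : Option Int) (x : Int) : Option Int :=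
  match o with | none => some x | some m => if x > m then some x else some m

def pvStepPt (s : PvSt) (p : Int × Int) : PvSt :=
  { s with xmin := pvOptMin s.xmin p.1, xmax := pvOptMax s.xmax p.1,
           ymin := pvOptMin s.ymin p.2, ymax := pvOptMax s.ymax p.2,
           xsum := s.xsum + p.1, ysum := s.ysum + p.2 }

def pvStepCon (s : PvSt) (c : Int × (List (Int × Int))) : PvSt :=
  c.2.foldl pvStepPt
    { s with total := s.total + (c.2.length : Int), fw := s.fw + c.1 * (c.2.length : Int) }

def process_alt (cons : List (Int × (List (Int × Int)))) : List (String × Int) :=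
  let s := cons.foldl pvStepCon ⟨0, 0, none, none, none, none, 0, 0⟩
  [("frame_start", ((PySem.List.pyGet? cons 0).getD (0, [])).1),
   ("frame_end",   ((PySem.List.pyGet? cons (-1)).getD (0, [])).1),
   ("frame", PySem.Int.floordiv s.fw s.total),
   ("x_min", s.xmin.getD 0 + 50),
   ("x_max", s.xmax.getD 0 + 50),
   ("x", PySem.Int.floordiv s.xsum s.total + 50),
   ("y_min", s.ymin.getD 0 + 50),
   ("y_max", s.ymax.getD 0 + 50),
   ("y", PySem.Int.floordiv s.ysum s.total + 50)]

-- ===== PRECONDITION & SPEC =====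
-- Pre_ excludes inputs with no contour point at all (empty cons or all contours empty): there
-- the Python A raises ZeroDivisionError and so does B.
def Pre_process (cons : List (Int × (List (Int × Int)))) : Prop := ∃ c ∈ cons, c.2 ≠ []
instance (cons : List (Int × (List (Int × Int)))) : Decidable (Pre_process cons) := by
  unfold Pre_process; infer_instance

def pvWitness_process : (List (Int × (List (Int × Int)))) := [(1, [(2, 3), (4, 5)]), (3, [(10, -1)])]

def Spec_process (cons : List (Int × (List (Int × Int)))) (out : List (String × Int)) : Prop := out = process_alt cons
instance (cons : List (Int × (List (Int × Int)))) (out : List (String × Int)) : Decidable (Spec_process cons out) := by unfold Spec_process; infer_instance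

-- ===== CLAIM (what is proved, stated in full; the proofs are below) =====
def Claim_equal_process : Prop := ∀ (cons : List (Int × (List (Int × Int)))), Dom_process cons → Pre_process cons → Spec_process cons (process cons)

-- ===== LEMMAS AND PROOFS =====

-- the key-adjustment loop on the literal dict, with the nine values abstract
theorem pv_dict_eval (a b c d e f g h i : Int) :
    (let info : PySem.Dict String Int := PySem.Dict.ofList [
      ("frame_start", a), ("frame_end", b), ("frame", c),
      ("x_min", d), ("x_max", e), ("x", f),
      ("y_min", g), ("y_max", h), ("y", i)]
     let info := info.keys.foldl (fun d k =>
        let d := if PySem.Str.startswith k "x" then d.modify k 0 (· + 50) else d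
        if PySem.Str.startswith k "y" then d.modify k 0 (· + 50) else d) info
     info.items)
    = [("frame_start", a), ("frame_end", b), ("frame", c),
       ("x_min", d + 50), ("x_max", e + 50), ("x", f + 50),
       ("y_min", g + 50), ("y_max", h + 50), ("y", i + 50)] := by
  simp [PySem.Dict.ofList, PySem.Dict.keys, PySem.Dict.modify, PySem.Dict.insert,
        PySem.Dict.contains, PySem.Dict.get?, PySem.Dict.empty, PySem.Str.startswith,
        PySem.Chars.startswith, PySem.Dict.update, PySem.Dict.getD]

theorem pvStepPt_total (l : List (Int × Int)) (s : PvSt) :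
    (l.foldl pvStepPt s).total = s.total := by
  induction l generalizing s with
  | nil => rfl
  | cons p t ih => simp [List.foldl_cons, ih, pvStepPt]

theorem pvStepPt_fw (l : List (Int × Int)) (s : PvSt) :
    (l.foldl pvStepPt s).fw = s.fw := by
  induction l generalizing s with
  | nil => rfl
  | cons p t ih => simp [List.foldl_cons, ih, pvStepPt]

theorem pv_total (cons : List (Int × (List (Int × Int)))) (s : PvSt) :
    (cons.foldl pvStepCon s).total = s.total + (cons.map (fun p => ((p.2.length : Int)))).sum := by
  induction cons generalizing s with
  | nil => simp
  | cons c t ih => simp [List.foldl_cons, ih, pvStepCon, pvStepPt_total]; ring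

theorem pv_fw (cons : List (Int × (List (Int × Int)))) (s : PvSt) :
    (cons.foldl pvStepCon s).fw = s.fw + (cons.map (fun p => p.1 * (p.2.length : Int))).sum := by
  induction cons generalizing s with
  | nil => simp
  | cons c t ih => simp [List.foldl_cons, ih, pvStepCon, pvStepPt_fw]; ring

-- each point-statistic field of the nested fold is a simple fold over the flattened point list
theorem pvStepPt_xmin (l : List (Int × Int)) (s : PvSt) :
    (l.foldl pvStepPt s).xmin = l.foldl (fun o p => pvOptMin o p.1) s.xmin := by
  induction l generalizing s with
  | nil => rfl
  | cons p t ih => simp [List.foldl_cons, ih, pvStepPt]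

theorem pvStepPt_xmax (l : List (Int × Int)) (s : PvSt) :
    (l.foldl pvStepPt s).xmax = l.foldl (fun o p => pvOptMax o p.1) s.xmax := by
  induction l generalizing s with
  | nil => rfl
  | cons p t ih => simp [List.foldl_cons, ih, pvStepPt]

theorem pvStepPt_ymin (l : List (Int × Int)) (s : PvSt) :
    (l.foldl pvStepPt s).ymin = l.foldl (fun o p => pvOptMin o p.2) s.ymin := by
  induction l generalizing s with
  | nil => rfl
  | cons p t ih => simp [List.foldl_cons, ih, pvStepPt]

theorem pvStepPt_ymax (l : List (Int × Int)) (s : PvSt) :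
    (l.foldl pvStepPt s).ymax = l.foldl (fun o p => pvOptMax o p.2) s.ymax := by
  induction l generalizing s with
  | nil => rfl
  | cons p t ih => simp [List.foldl_cons, ih, pvStepPt]

theorem pvStepPt_xsum (l : List (Int × Int)) (s : PvSt) :
    (l.foldl pvStepPt s).xsum = l.foldl (fun a p => a + p.1) s.xsum := by
  induction l generalizing s with
  | nil => rfl
  | cons p t ih => simp [List.foldl_cons, ih, pvStepPt]

theorem pvStepPt_ysum (l : List (Int × Int)) (s : PvSt) :
    (l.foldl pvStepPt s).ysum = l.foldl (fun a p => a + p.2) s.ysum := by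
  induction l generalizing s with
  | nil => rfl
  | cons p t ih => simp [List.foldl_cons, ih, pvStepPt]

-- lift a point-statistic fold through the outer contour fold: it becomes a fold over flatMap
theorem pv_lift {β : Type} (get : PvSt → β) (step : β → (Int × Int) → β)
    (hpt : ∀ (l : List (Int × Int)) (s : PvSt), get (l.foldl pvStepPt s) = l.foldl step (get s))
    (hset : ∀ (s : PvSt) (t f : Int), get { s with total := t, fw := f } = get s)
    (cons : List (Int × (List (Int × Int)))) (s : PvSt) :
    get (cons.foldl pvStepCon s) = (cons.flatMap (fun p => p.2)).foldl step (get s) := by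
  induction cons generalizing s with
  | nil => rfl
  | cons c t ih =>
    simp only [List.foldl_cons, List.flatMap_cons, List.foldl_append, pvStepCon, ih, hpt, hset]

theorem pv_optmin_some (t : List Int) (m : Int) :
    t.foldl pvOptMin (some m) = some (t.foldl min m) := by
  induction t generalizing m with
  | nil => rfl
  | cons x r ih =>
    have : pvOptMin (some m) x = some (min m x) := by
      simp only [pvOptMin, Int.min_def]
      split <;> split <;> first | rfl | (congr 1; omega)
    simp [List.foldl_cons, this, ih]

theorem pv_optmax_some (t : List Int) (m : Int) :
    t.foldl pvOptMax (some m) = some (t.foldl max m) := by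
  induction t generalizing m with
  | nil => rfl
  | cons x r ih =>
    have : pvOptMax (some m) x = some (max m x) := by
      simp only [pvOptMax, Int.max_def]
      split <;> split <;> first | rfl | (congr 1; omega)
    simp [List.foldl_cons, this, ih]

theorem pv_optmin_eq_min? (xs : List Int) :
    xs.foldl pvOptMin none = PySem.List.min? xs (fun v => v) := by
  cases xs with
  | nil => rfl
  | cons x t =>
    rw [PySem.List.min?_id_cons]
    simpa [pvOptMin] using pv_optmin_some t x

theorem pv_optmax_eq_max? (xs : List Int) :
    xs.foldl pvOptMax none = PySem.List.max? xs (fun v => v) := by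
  cases xs with
  | nil => rfl
  | cons x t =>
    rw [PySem.List.max?_id_cons]
    simpa [pvOptMax] using pv_optmax_some t x

theorem pv_foldl_add (xs : List Int) : xs.foldl (· + ·) 0 = xs.sum := by
  simp [List.sum_eq_foldl]

-- ===== VERDICT (by name: the statement is the Claim_ definition above) =====
theorem process_spec : Claim_equal_process := by
  intro cons _hdom _hpre
  unfold Spec_process process process_alt
  rw [pv_dict_eval]
  have htot := pv_total cons ⟨0, 0, none, none, none, none, 0, 0⟩
  have hfw := pv_fw cons ⟨0, 0, none, none, none, none, 0, 0⟩
  have hxmin := pv_lift PvSt.xmin (fun o p => pvOptMin o p.1) pvStepPt_xmin (fun _ _ _ => rfl) cons ⟨0, 0, none, none, none, none, 0, 0⟩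
  have hxmax := pv_lift PvSt.xmax (fun o p => pvOptMax o p.1) pvStepPt_xmax (fun _ _ _ => rfl) cons ⟨0, 0, none, none, none, none, 0, 0⟩
  have hymin := pv_lift PvSt.ymin (fun o p => pvOptMin o p.2) pvStepPt_ymin (fun _ _ _ => rfl) cons ⟨0, 0, none, none, none, none, 0, 0⟩
  have hymax := pv_lift PvSt.ymax (fun o p => pvOptMax o p.2) pvStepPt_ymax (fun _ _ _ => rfl) cons ⟨0, 0, none, none, none, none, 0, 0⟩
  have hxsum := pv_lift PvSt.xsum (fun a p => a + p.1) pvStepPt_xsum (fun _ _ _ => rfl) cons ⟨0, 0, none, none, none, none, 0, 0⟩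
  have hysum := pv_lift PvSt.ysum (fun a p => a + p.2) pvStepPt_ysum (fun _ _ _ => rfl) cons ⟨0, 0, none, none, none, none, 0, 0⟩
  simp only [htot, hfw, hxmin, hxmax, hymin, hymax, hxsum, hysum, zero_add]
  have hmin1 : ((cons.flatMap (fun p => p.2)).foldl (fun o p => pvOptMin o p.1) none)
      = PySem.List.min? ((cons.flatMap (fun p => p.2)).map Prod.fst) (fun v => v) := by
    rw [← pv_optmin_eq_min?, List.foldl_map]
  have hmax1 : ((cons.flatMap (fun p => p.2)).foldl (fun o p => pvOptMax o p.1) none)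
      = PySem.List.max? ((cons.flatMap (fun p => p.2)).map Prod.fst) (fun v => v) := by
    rw [← pv_optmax_eq_max?, List.foldl_map]
  have hmin2 : ((cons.flatMap (fun p => p.2)).foldl (fun o p => pvOptMin o p.2) none)
      = PySem.List.min? ((cons.flatMap (fun p => p.2)).map Prod.snd) (fun v => v) := by
    rw [← pv_optmin_eq_min?, List.foldl_map]
  have hmax2 : ((cons.flatMap (fun p => p.2)).foldl (fun o p => pvOptMax o p.2) none)
      = PySem.List.max? ((cons.flatMap (fun p => p.2)).map Prod.snd) (fun v => v) := by
    rw [← pv_optmax_eq_max?, List.foldl_map]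
  have hs1 : ((cons.flatMap (fun p => p.2)).foldl (fun a p => a + p.1) 0)
      = ((cons.flatMap (fun p => p.2)).map Prod.fst).sum := by
    rw [← pv_foldl_add, List.foldl_map]
  have hs2 : ((cons.flatMap (fun p => p.2)).foldl (fun a p => a + p.2) 0)
      = ((cons.flatMap (fun p => p.2)).map Prod.snd).sum := by
    rw [← pv_foldl_add, List.foldl_map]
  rw [hmin1, hmax1, hmin2, hmax2, hs1, hs2]
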